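-- pv_equiv track=rewrite | github.com/nt-milton/example | search/cloudsearch.py | _parse_cloudsearch_search_response
-- ===== SOURCE A (Python) =====
-- def _parse_cloudsearch_search_response(response):
--     records = []
--     records_by_type = {}
--     hits = response.get('hits').get('hit', [])
--     for hit in hits:
--         hit_type, *hit_id = hit.get('id').split('-')
--         hit_id = '-'.join(hit_id)
--         records.append((hit_type, hit_id))
--         records_by_type[hit_type] = records_by_type.get(hit_type, [])
--         records_by_type[hit_type].append(hit_id)
--     return records, records_by_type
-- ===== SOURCE B (Python) =====
-- def _split_id(doc_id):
--     hit_type, *rest = doc_id.split('-')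
--     return hit_type, '-'.join(rest)
--
--
-- def _parse_cloudsearch_search_response(response):
--     hits = response.get('hits').get('hit', [])
--     records = [_split_id(hit.get('id')) for hit in hits]
--     types = dict.fromkeys(t for t, _ in records)
--     records_by_type = {t: [i for tt, i in records if tt == t] for t in types}
--     return records, records_by_type
-- ===== Notes on version B (the rewrite author's own statement) =====
-- stated objective: alternative
-- what changed: B maps hits to records with a comprehension, then builds records_by_type declaratively (ordered-unique types + a per-type filter comprehension) instead of A's single loop that incrementally mutates a dict entry per hit.
import Mathlib
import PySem

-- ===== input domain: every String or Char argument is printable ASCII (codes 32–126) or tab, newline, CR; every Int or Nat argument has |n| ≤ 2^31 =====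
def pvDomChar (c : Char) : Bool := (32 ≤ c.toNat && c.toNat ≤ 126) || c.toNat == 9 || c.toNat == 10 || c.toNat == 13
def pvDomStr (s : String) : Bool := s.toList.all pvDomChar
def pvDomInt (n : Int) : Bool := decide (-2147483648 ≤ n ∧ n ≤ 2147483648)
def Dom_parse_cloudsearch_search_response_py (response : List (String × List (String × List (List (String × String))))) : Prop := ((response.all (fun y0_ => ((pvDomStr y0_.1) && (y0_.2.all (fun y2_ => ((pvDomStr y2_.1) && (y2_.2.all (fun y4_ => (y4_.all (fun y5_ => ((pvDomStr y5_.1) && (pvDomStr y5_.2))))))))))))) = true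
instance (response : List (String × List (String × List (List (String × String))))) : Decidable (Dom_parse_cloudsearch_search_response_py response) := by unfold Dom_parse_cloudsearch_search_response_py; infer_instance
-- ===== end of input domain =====

-- B builds records with a comprehension and then builds records_by_type declaratively
-- (ordered-unique types, one filter comprehension per type) instead of A's single loop
-- that incrementally mutates a dict entry per hit; alternative decomposition, not faster.

-- ===== PORT A =====
def parse_cloudsearch_search_response_py (response : List (String × List (String × List (List (String × String))))) : (List (String × String)) × (List (String × List String)) :=
  -- hits = response.get('hits').get('hit', [])  (raises if 'hits' is absent: excluded by Pre_)
  let hits := PySem.Dict.getD (PySem.Dict.mk (((PySem.Dict.mk response).get? "hits").getD [])) "hit" []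
  let st := hits.foldl (fun (st : List (String × String) × PySem.Dict String (List String)) hit =>
      -- hit_type, *hit_id = hit.get('id').split('-')  (raises if 'id' is absent: excluded by Pre_;
      -- split? with nonempty sep is always some and nonempty, so the getD/headD defaults are unreachable)
      let parts := (PySem.Str.split? (((PySem.Dict.mk hit).get? "id").getD "") "-").getD []
      let hit_type := parts.headD ""
      let hit_id := PySem.Str.join "-" parts.tail
      -- records_by_type[hit_type] = records_by_type.get(hit_type, []); records_by_type[hit_type].append(hit_id)
      let x := PySem.Dict.getD st.2 hit_type []
      (st.1 ++ [(hit_type, hit_id)],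
       (PySem.Dict.insert st.2 hit_type x).insert hit_type (x ++ [hit_id])))
    ([], PySem.Dict.mk [])
  (st.1, st.2.items)

-- ===== PORT B =====
def split_id_py (doc_id : String) : String × String :=
  let parts := (PySem.Str.split? doc_id "-").getD []
  (parts.headD "", PySem.Str.join "-" parts.tail)

def parse_cloudsearch_search_response_py_alt (response : List (String × List (String × List (List (String × String))))) : (List (String × String)) × (List (String × List String)) :=
  let hits := PySem.Dict.getD (PySem.Dict.mk (((PySem.Dict.mk response).get? "hits").getD [])) "hit" []
  let records := hits.map (fun hit => split_id_py (((PySem.Dict.mk hit).get? "id").getD ""))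
  let types := PySem.List.dedup (records.map Prod.fst)
  (records, types.map (fun t => (t, (records.filter (fun r => r.1 == t)).map Prod.snd)))

-- ===== PRECONDITION & SPEC =====
-- Pre_ excludes exactly the inputs on which A raises AttributeError: a response without a
-- 'hits' key, or a hit without an 'id' key (None.get / None.split).
def Pre_parse_cloudsearch_search_response_py (response : List (String × List (String × List (List (String × String))))) : Prop :=
  ((PySem.Dict.mk response).get? "hits").isSome = true ∧
  ∀ hit ∈ PySem.Dict.getD (PySem.Dict.mk (((PySem.Dict.mk response).get? "hits").getD [])) "hit" [],
    ((PySem.Dict.mk hit).get? "id").isSome = true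
instance (response : List (String × List (String × List (List (String × String))))) : Decidable (Pre_parse_cloudsearch_search_response_py response) := by unfold Pre_parse_cloudsearch_search_response_py; infer_instance

def pvWitness_parse_cloudsearch_search_response_py : (List (String × List (String × List (List (String × String))))) :=
  [("hits", [("hit", [[("id", "post-a-1")], [("id", "user-2")], [("id", "post")]])])]

def Spec_parse_cloudsearch_search_response_py (response : List (String × List (String × List (List (String × String))))) (out : (List (String × String)) × (List (String × List String))) : Prop := out = parse_cloudsearch_search_response_py_alt response
instance (response : List (String × List (String × List (List (String × String))))) (out : (List (String × String)) × (List (String × List String))) : Decidable (Spec_parse_cloudsearch_search_response_py response out) := by unfold Spec_parse_cloudsearch_search_response_py; infer_instance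

-- ===== CLAIM (what is proved, stated in full; the proofs are below) =====
def Claim_equal_parse_cloudsearch_search_response_py : Prop := ∀ (response : List (String × List (String × List (List (String × String))))), Dom_parse_cloudsearch_search_response_py response → Pre_parse_cloudsearch_search_response_py response → Spec_parse_cloudsearch_search_response_py response (parse_cloudsearch_search_response_py response)

-- ===== LEMMAS AND PROOFS =====

-- the grouping B computes, as a function of the records list
def pvG (rs : List (String × String)) : List (String × List String) :=
  (PySem.List.dedup (rs.map Prod.fst)).map (fun t => (t, (rs.filter (fun r => r.1 == t)).map Prod.snd))

theorem pv_find_self (l : List String) (t : String) :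
    l.find? (fun x => x == t) = if t ∈ l then some t else none := by
  induction l with
  | nil => simp
  | cons a l ih =>
    by_cases h : a = t
    · subst h; simp
    · have h' : ¬ (t = a) := fun e => h e.symm
      simp [List.find?, beq_eq_false_iff_ne.mpr h, ih, h']

theorem pv_any_beq (l : List String) (t : String) : (l.any fun x => x == t) = decide (t ∈ l) := by
  induction l with
  | nil => simp
  | cons a l ih =>
    by_cases h : t = a
    · simp [h]
    · simp [h, ih]
      intro e; exact absurd e.symm h

theorem pv_dedup_snoc (xs : List String) (x : String) :
    PySem.List.dedup (xs ++ [x]) =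
      if x ∈ xs then PySem.List.dedup xs else PySem.List.dedup xs ++ [x] := by
  have h : PySem.List.dedup (xs ++ [x]) = PySem.Set.add (PySem.List.dedup xs) x := by
    simp [PySem.List.dedup, PySem.Set.ofList, List.foldl_append]
  have hc : PySem.Set.contains (PySem.List.dedup xs) x = decide (x ∈ xs) := by
    rw [PySem.Set.contains]
    simp [List.contains_eq_mem]
  rw [h, PySem.Set.add, hc]
  by_cases hm : x ∈ xs <;> simp [hm]

theorem pv_get?_G (rs : List (String × String)) (t : String) :
    (PySem.Dict.mk (pvG rs)).get? t =
      if t ∈ rs.map Prod.fst then some ((rs.filter (fun r => r.1 == t)).map Prod.snd)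
      else none := by
  rw [PySem.Dict.get?, pvG]
  simp only [List.find?_map]
  have : (List.find? ((fun (p : String × List String) => p.1 == t) ∘
      (fun t' => (t', (rs.filter (fun r => r.1 == t')).map Prod.snd))) (PySem.List.dedup (rs.map Prod.fst)))
      = List.find? (fun x => x == t) (PySem.List.dedup (rs.map Prod.fst)) := rfl
  rw [this, pv_find_self]
  simp
  by_cases hm : t ∈ rs.map Prod.fst <;> simp [hm]

theorem pv_contains_G (rs : List (String × String)) (t : String) :
    (PySem.Dict.mk (pvG rs)).contains t = decide (t ∈ rs.map Prod.fst) := by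
  rw [PySem.Dict.contains, pvG]
  simp only [List.any_map, Function.comp_def]
  have : (List.any (PySem.List.dedup (rs.map Prod.fst)) fun x => x == t) = decide (t ∈ rs.map Prod.fst) := by
    rw [pv_any_beq]
    simp
  exact this

theorem pv_filter_nil_of_not_mem (rs : List (String × String)) (t : String) (h : t ∉ rs.map Prod.fst) :
    rs.filter (fun r => r.1 == t) = [] := by
  rw [List.filter_eq_nil_iff]
  intro r hr
  simp only [beq_iff_eq]
  intro he
  exact h (List.mem_map.mpr ⟨r, hr, he⟩)

theorem pv_G_snoc (rs : List (String × String)) (t i : String) :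
    pvG (rs ++ [(t, i)]) =
      if t ∈ rs.map Prod.fst
      then (pvG rs).map (fun p => if p.1 == t then (t, p.2 ++ [i]) else p)
      else pvG rs ++ [(t, [i])] := by
  rw [pvG, pvG]
  simp only [List.map_append, List.map_cons, List.map_nil, pv_dedup_snoc]
  by_cases hm : t ∈ rs.map Prod.fst
  · rw [if_pos hm, if_pos hm, List.map_map]
    apply List.map_congr_left
    intro t' _
    simp only [Function.comp]
    by_cases he : t' = t
    · subst he
      simp [List.filter_append]
    · have : (t' == t) = false := beq_eq_false_iff_ne.mpr he
      simp [List.filter_append, this]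
      exact fun e => absurd e.symm he
  · rw [if_neg hm, if_neg hm, List.map_append, List.map_cons, List.map_nil]
    congr 1
    · apply List.map_congr_left
      intro t' ht'
      have hne : t' ≠ t := by
        intro e; subst e; exact hm ((PySem.List.mem_dedup _ _).mp ht')
      have : (t' == t) = false := beq_eq_false_iff_ne.mpr hne
      simp [List.filter_append, this]
      exact fun e => absurd e.symm hne
    · simp [List.filter_append, pv_filter_nil_of_not_mem rs t hm]

theorem pv_mem_G (rs : List (String × String)) (p : String × List String) (hp : p ∈ pvG rs) :
    p.2 = (rs.filter (fun r => r.1 == p.1)).map Prod.snd ∧ p.1 ∈ rs.map Prod.fst := by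
  obtain ⟨t', ht', he⟩ := List.mem_map.mp hp
  subst he
  exact ⟨rfl, (PySem.List.mem_dedup _ _).mp ht'⟩

theorem pv_step (rs : List (String × String)) (t i : String) :
    (let x := PySem.Dict.getD (PySem.Dict.mk (pvG rs)) t [];
     ((PySem.Dict.mk (pvG rs)).insert t x).insert t (x ++ [i])) = PySem.Dict.mk (pvG (rs ++ [(t, i)])) := by
  simp only [PySem.Dict.getD, pv_get?_G]
  by_cases hm : t ∈ rs.map Prod.fst
  · rw [if_pos hm]
    have hx : (Option.some ((rs.filter (fun r => r.1 == t)).map Prod.snd)).getD [] =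
        (rs.filter (fun r => r.1 == t)).map Prod.snd := rfl
    rw [hx]
    have h1 : (PySem.Dict.mk (pvG rs)).insert t ((rs.filter (fun r => r.1 == t)).map Prod.snd)
        = PySem.Dict.mk (pvG rs) := by
      rw [PySem.Dict.insert, if_pos (by rw [pv_contains_G]; simpa using hm)]
      apply PySem.Dict.ext
      show List.map _ (pvG rs) = pvG rs
      rw [show pvG rs = List.map id (pvG rs) from (List.map_id _).symm, List.map_map]
      apply List.map_congr_left
      intro p hp
      simp only [Function.comp, List.map_id, id]
      by_cases hpt : p.1 == t
      · have hpe : p.1 = t := beq_iff_eq.mp hpt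
        have := (pv_mem_G rs p (by simpa using hp)).1
        rw [if_pos hpt, ← hpe, ← this]
      · rw [if_neg (by simp_all)]
    rw [h1, PySem.Dict.insert, if_pos (by rw [pv_contains_G]; simpa using hm)]
    apply PySem.Dict.ext
    show List.map _ (pvG rs) = pvG (rs ++ [(t, i)])
    rw [pv_G_snoc, if_pos hm]
    apply List.map_congr_left
    intro p hp
    by_cases hpt : p.1 == t
    · have hpe : p.1 = t := beq_iff_eq.mp hpt
      have := (pv_mem_G rs p hp).1
      rw [if_pos hpt, if_pos hpt, ← hpe, ← this]
    · rw [if_neg (by simp_all), if_neg (by simp_all)]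
  · rw [if_neg hm]
    have h1 : (PySem.Dict.mk (pvG rs)).insert t ((Option.none).getD [])
        = PySem.Dict.mk (pvG rs ++ [(t, ([] : List String))]) := by
      rw [PySem.Dict.insert, if_neg]
      · rfl
      · rw [pv_contains_G]; simpa using hm
    rw [h1, PySem.Dict.insert, if_pos]
    · apply PySem.Dict.ext
      show List.map _ (pvG rs ++ [(t, ([] : List String))]) = pvG (rs ++ [(t, i)])
      rw [pv_G_snoc, if_neg hm, List.map_append]
      congr 1
      · rw [show pvG rs = List.map id (pvG rs) from (List.map_id _).symm, List.map_map]
        apply List.map_congr_left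
        intro p hp
        simp only [Function.comp, List.map_id, id]
        have hpm := (pv_mem_G rs p (by simpa using hp)).2
        have : p.1 ≠ t := fun e => hm (e ▸ hpm)
        rw [if_neg (by simp_all)]
      · simp
    · rw [PySem.Dict.contains]
      simp

-- the record A computes for one hit (= B's split_id_py on the hit's id)
def pvRecOf (hit : List (String × String)) : String × String :=
  split_id_py (((PySem.Dict.mk hit).get? "id").getD "")

theorem pv_fold (hits : List (List (String × String))) (acc : List (String × String)) :
    hits.foldl (fun (st : List (String × String) × PySem.Dict String (List String)) hit =>
      let parts := (PySem.Str.split? (((PySem.Dict.mk hit).get? "id").getD "") "-").getD []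
      let hit_type := parts.headD ""
      let hit_id := PySem.Str.join "-" parts.tail
      let x := PySem.Dict.getD st.2 hit_type []
      (st.1 ++ [(hit_type, hit_id)],
       (PySem.Dict.insert st.2 hit_type x).insert hit_type (x ++ [hit_id])))
      (acc, PySem.Dict.mk (pvG acc))
    = (acc ++ hits.map pvRecOf, PySem.Dict.mk (pvG (acc ++ hits.map pvRecOf))) := by
  induction hits generalizing acc with
  | nil => simp
  | cons hit hits ih =>
    rw [List.foldl_cons]
    have hstep : (let parts := (PySem.Str.split? (((PySem.Dict.mk hit).get? "id").getD "") "-").getD []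
      let hit_type := parts.headD ""
      let hit_id := PySem.Str.join "-" parts.tail
      let x := PySem.Dict.getD (PySem.Dict.mk (pvG acc)) hit_type []
      (acc ++ [(hit_type, hit_id)],
       ((PySem.Dict.mk (pvG acc)).insert hit_type x).insert hit_type (x ++ [hit_id])))
      = (acc ++ [pvRecOf hit], PySem.Dict.mk (pvG (acc ++ [pvRecOf hit]))) := by
      show (acc ++ [pvRecOf hit], _) = _
      rw [Prod.mk.injEq]
      exact ⟨rfl, pv_step acc (pvRecOf hit).1 (pvRecOf hit).2⟩
    rw [hstep, ih, List.append_assoc]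
    rfl

-- ===== VERDICT (by name: the statement is the Claim_ definition above) =====
theorem parse_cloudsearch_search_response_py_spec : Claim_equal_parse_cloudsearch_search_response_py := by
  intro response _ _
  show parse_cloudsearch_search_response_py response = parse_cloudsearch_search_response_py_alt response
  rw [parse_cloudsearch_search_response_py, parse_cloudsearch_search_response_py_alt]
  have h0 : (PySem.Dict.mk ([] : List (String × List String))) = PySem.Dict.mk (pvG []) := rfl
  rw [h0, pv_fold]
  rfl
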